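-- pv_equiv track=rewrite | github.com/the-virtual-brain/tvb-root | tvb_framework/tvb/interfaces/web/controllers/burst/matjax.py | _multiline_math_directives_to_matjax
-- ===== SOURCE A (Python) =====
-- def _multiline_math_directives_to_matjax(doc):
--     """
--     Looks for multi-line sphinx math directives in the given rst string
--     It converts them in html text that will be interpreted by mathjax
--     The parsing is simplistic, not a rst parser.
--     Wraps .. math :: body in \[\begin{split}\end{split}\]
--     """
--
--     # doc = text | math
--     BEGIN = r'\[\begin{split}'
--     END = r'\end{split}\]'
--
--     in_math = False  # 2 state parser
--     out_lines = []
--     indent = ''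
--
--     for line in doc.splitlines():
--         if not in_math:
--             # math = indent directive math_body
--             indent, sep, _ = line.partition('.. math::')
--             if sep:
--                 out_lines.append(BEGIN)
--                 in_math = True
--             else:
--                 out_lines.append(line)
--         else:
--             # math body is at least 1 space more indented than the directive, but we tolerate empty lines
--             if line.startswith(indent + ' ') or line.strip() == '':
--                 out_lines.append(line)
--             else:
--                 # this line is not properly indented, math block is over
--                 out_lines.append(END)
--                 out_lines.append(line)
--                 in_math = False
--
--     if in_math:
--         # close math tag
--         out_lines.append(END)
--
--     return '\n'.join(out_lines)
-- ===== SOURCE B (Python) =====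
-- def _multiline_math_directives_to_matjax(doc):
--     """Nested block-consuming index loop instead of the in_math flag state machine."""
--     BEGIN = r'\[\begin{split}'
--     END = r'\end{split}\]'
--     lines = doc.splitlines()
--     n = len(lines)
--     out = []
--     i = 0
--     while i < n:
--         indent, sep, _ = lines[i].partition('.. math::')
--         i += 1
--         if not sep:
--             out.append(indent)  # no directive: line == indent here
--             continue
--         out.append(BEGIN)
--         while i < n and (lines[i].startswith(indent + ' ') or lines[i].strip() == ''):
--             out.append(lines[i])
--             i += 1
--         out.append(END)
--         if i < n:
--             # the terminating line is emitted verbatim, never re-parsed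
--             out.append(lines[i])
--             i += 1
--     return '\n'.join(out)
-- ===== Notes on version B (the rewrite author's own statement) =====
-- stated objective: alternative
-- what changed: Replaces the in_math boolean state machine over splitlines with a nested block-consuming loop: an outer scan finds a math directive marker and an inner loop then consumes the whole indented/blank body, emitting END and the terminating line directly.
import Mathlib
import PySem

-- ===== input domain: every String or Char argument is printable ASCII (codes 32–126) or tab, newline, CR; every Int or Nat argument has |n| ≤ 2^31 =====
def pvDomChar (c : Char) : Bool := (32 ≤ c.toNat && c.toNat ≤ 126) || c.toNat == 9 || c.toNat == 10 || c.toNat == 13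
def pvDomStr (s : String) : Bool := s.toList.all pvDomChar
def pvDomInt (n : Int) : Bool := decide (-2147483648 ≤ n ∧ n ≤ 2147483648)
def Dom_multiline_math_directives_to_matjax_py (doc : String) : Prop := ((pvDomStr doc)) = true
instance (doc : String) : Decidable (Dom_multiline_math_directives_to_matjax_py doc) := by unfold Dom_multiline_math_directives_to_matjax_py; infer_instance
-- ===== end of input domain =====

-- B replaces A's in_math flag state machine with a nested block-consuming loop (objective: alternative decomposition).

-- shared string primitives (both Pythons call the same built-ins)
def pvBEGIN : String := "\\[\\begin{split}"
def pvEND : String := "\\end{split}\\]"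

-- line.partition(sep): exact port of str.partition via find + take/drop on the code points
def pvPartition3 (line sep : String) : String × String × String :=
  if (PySem.Str.find line sep) = -1 then (line, "", "")
  else (String.ofList (line.toList.take (PySem.Str.find line sep).toNat), sep,
        String.ofList (line.toList.drop ((PySem.Str.find line sep).toNat + sep.toList.length)))

-- line.startswith(indent + ' ') or line.strip() == ''  (shared body-line test)
def pvBodyLine (indent line : String) : Bool :=
  PySem.Str.startswith line (indent ++ " ") || PySem.Str.strip line == ""

-- ===== PORT A =====
-- A's 2-state loop: state = (in_math, indent, out_lines)
def pvGoA : List String → Bool → String → List String → List String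
  | [], inMath, _, out => if inMath then out ++ [pvEND] else out
  | l :: rest, inMath, indent, out =>
    if inMath then
      if pvBodyLine indent l then pvGoA rest true indent (out ++ [l])
      else pvGoA rest false indent (out ++ [pvEND, l])
    else
      match pvPartition3 l ".. math::" with
      | (ind, sep, _) =>
        if sep ≠ "" then pvGoA rest true ind (out ++ [pvBEGIN])
        else pvGoA rest false indent (out ++ [l])

def multiline_math_directives_to_matjax_py (doc : String) : String :=
  PySem.Str.join "\n" (pvGoA (PySem.Str.splitlines doc) false "" [])

-- ===== PORT B =====
-- B's inner while loop: consume the math body, return (body lines, remaining lines)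
def pvInnerB (indent : String) : List String → List String × List String
  | [] => ([], [])
  | l :: rest =>
    if pvBodyLine indent l then
      let p := pvInnerB indent rest
      (l :: p.1, p.2)
    else ([], l :: rest)

theorem pvInnerB_snd_length_le (indent : String) (xs : List String) :
    (pvInnerB indent xs).2.length ≤ xs.length := by
  induction xs with
  | nil => simp [pvInnerB]
  | cons l rest ih =>
    simp only [pvInnerB]
    split
    · exact le_trans ih (Nat.le_succ _)
    · simp

-- B's outer loop over the lines
def pvOuterB : List String → List String
  | [] => []
  | l :: rest =>
    match pvPartition3 l ".. math::" with
    | (ind, sep, _) =>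
      if sep ≠ "" then
        match hr : (pvInnerB ind rest).2 with
        | [] => pvBEGIN :: (pvInnerB ind rest).1 ++ [pvEND]
        | t :: rest' =>
          pvBEGIN :: (pvInnerB ind rest).1 ++ [pvEND, t] ++ pvOuterB rest'
      else ind :: pvOuterB rest
  termination_by xs => xs.length
  decreasing_by
    · have h := pvInnerB_snd_length_le ind rest
      rw [hr] at h
      simp at h ⊢
      omega
    · simp

def multiline_math_directives_to_matjax_py_alt (doc : String) : String :=
  PySem.Str.join "\n" (pvOuterB (PySem.Str.splitlines doc))

-- ===== PRECONDITION & SPEC =====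
def Spec_multiline_math_directives_to_matjax_py (doc : String) (out : String) : Prop := out = multiline_math_directives_to_matjax_py_alt doc
instance (doc : String) (out : String) : Decidable (Spec_multiline_math_directives_to_matjax_py doc out) := by unfold Spec_multiline_math_directives_to_matjax_py; infer_instance

-- ===== CLAIM (what is proved, stated in full; the proofs are below) =====
def Claim_equal_multiline_math_directives_to_matjax_py : Prop := ∀ (doc : String), Dom_multiline_math_directives_to_matjax_py doc → Spec_multiline_math_directives_to_matjax_py doc (multiline_math_directives_to_matjax_py doc)

-- ===== LEMMAS AND PROOFS =====

-- In the no-directive branch B appends `indent`, which equals the whole line there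
theorem pvPartition3_of_no_sep (l : String) (h : (pvPartition3 l ".. math::").2.1 = "") :
    (pvPartition3 l ".. math::").1 = l := by
  unfold pvPartition3 at h ⊢
  by_cases hf : PySem.Str.find l ".. math::" = -1
  · rw [if_pos hf]
  · rw [if_neg hf] at h
    simp at h

-- main simultaneous induction: A's false-state equals B's outer loop,
-- A's true-state equals B's inner loop followed by END / terminator handling
theorem pvMain (n : Nat) : ∀ xs : List String, xs.length ≤ n →
    (∀ (ind : String) (acc : List String), pvGoA xs false ind acc = acc ++ pvOuterB xs) ∧
    (∀ (ind : String) (acc : List String), pvGoA xs true ind acc =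
      acc ++ (pvInnerB ind xs).1 ++
        (match (pvInnerB ind xs).2 with
         | [] => [pvEND]
         | t :: rest' => pvEND :: t :: pvOuterB rest')) := by
  induction n with
  | zero =>
    intro xs hxs
    have hx : xs = [] := List.eq_nil_of_length_eq_zero (Nat.le_zero.mp hxs)
    subst hx
    constructor <;> intro ind acc <;> simp [pvGoA, pvOuterB, pvInnerB]
  | succ n ih =>
    intro xs hxs
    cases xs with
    | nil =>
      constructor <;> intro ind acc <;> simp [pvGoA, pvOuterB, pvInnerB]
    | cons l rest =>
      have hrest : rest.length ≤ n := by simpa using Nat.lt_succ_iff.mp (Nat.lt_of_lt_of_le (by simp) hxs)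
      constructor
      · intro ind acc
        by_cases hsep : (pvPartition3 l ".. math::").2.1 = ""
        · -- no directive: both append the line and recurse
          have hl := pvPartition3_of_no_sep l hsep
          rw [pvGoA, pvOuterB]
          rcases hp : pvPartition3 l ".. math::" with ⟨i, s, r⟩
          rw [hp] at hsep hl
          simp only at hsep hl
          subst hsep
          simp only [ne_eq, not_true_eq_false, if_false, ite_false, hl]
          rw [(ih rest hrest).1 ind (acc ++ [l])]
          simp
        · -- directive found: A enters math state, B runs the inner loop
          rw [pvGoA, pvOuterB]
          rcases hp : pvPartition3 l ".. math::" with ⟨i, s, r⟩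
          rw [hp] at hsep
          simp only at hsep
          simp only [ne_eq, hsep, not_false_eq_true, if_true, ite_true]
          rw [(ih rest hrest).2 i (acc ++ [pvBEGIN])]
          cases hr : (pvInnerB i rest).2 with
          | nil => simp [hr]
          | cons t rest' => simp [hr]
      · intro ind acc
        rw [pvGoA]
        by_cases hb : pvBodyLine ind l = true
        · -- body line: inner loop consumes it
          simp only [hb, if_true, ite_true, pvInnerB]
          rw [(ih rest hrest).2 ind (acc ++ [l])]
          cases hr : (pvInnerB ind rest).2 with
          | nil => simp [hr]
          | cons t rest' => simp [hr]
        · -- bad line terminates the block: END then the line verbatim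
          simp only [hb, if_false, ite_false, pvInnerB, Bool.not_eq_true] at *
          simp only [hb, ite_false, Bool.false_eq_true, if_false]
          rw [(ih rest hrest).1 ind (acc ++ [pvEND, l])]
          simp

-- ===== VERDICT (by name: the statement is the Claim_ definition above) =====
theorem multiline_math_directives_to_matjax_py_spec : Claim_equal_multiline_math_directives_to_matjax_py := by
  intro doc _
  unfold Spec_multiline_math_directives_to_matjax_py
  unfold multiline_math_directives_to_matjax_py multiline_math_directives_to_matjax_py_alt
  have h := (pvMain (PySem.Str.splitlines doc).length (PySem.Str.splitlines doc) le_rfl).1 "" []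
  rw [h]
  rfl
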